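-- pv_equiv track=rewrite | github.com/grapadacious/advent-of-code | events/2023/03/main.py | find_possible_gears
-- ===== SOURCE A (Python) =====
-- def update_possible_gears(possible_gears, n, star_coords):
--     if len(star_coords) < 1:
--         return possible_gears
--
--     for coords in star_coords:
--         if coords not in possible_gears:
--             possible_gears[coords] = []
--
--         possible_gears[coords].append(n)
--
--     return possible_gears
--
-- def get_stars(i, j, input):
--     stars = set()
--
--     for ai in range(i - 1, i + 2):
--         for aj in range(j - 1, j + 2):
--             if ai == i and aj == j:
--                 continue
--             if ai < 0 or ai > len(input) - 1:
--                 continue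
--             if aj < 0 or aj > len(input[ai]) - 1:
--                 continue
--
--             if input[ai][aj] != '*':
--                 continue
--
--             stars.add((ai, aj))
--
--     return stars
--
-- def find_possible_gears(input):
--     possible_gears = {}
--
--     for i in range(len(input)):
--         row = input[i]
--         num_s = ''
--         star_coords = set()
--
--         for j in range(len(row)):
--             c = row[j]
--
--             if c.isdigit():
--                 num_s += c
--                 star_coords.update(get_stars(i, j, input))
--                 continue
--
--             if len(num_s) > 0:
--                 possible_gears = update_possible_gears(possible_gears, int(num_s), star_coords)
--
--             num_s = ''
--             star_coords = set()
--
--         if len(num_s) > 0: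
--                 possible_gears = update_possible_gears(possible_gears, int(num_s), star_coords)
--
--     return possible_gears
-- ===== SOURCE B (Python) =====
-- def find_possible_gears(input):
--     # Two-pass rewrite: scan each row for whole numbers (run scanning), then walk each
--     # number's border cells once, appending the value at every '*' cell.
--     possible_gears = {}
--     for i, row in enumerate(input):
--         j = 0
--         while j < len(row):
--             if not row[j].isdigit():
--                 j += 1
--                 continue
--             start = j
--             while j < len(row) and row[j].isdigit():
--                 j += 1
--             value = int(row[start:j])
--             # border cells: the 8 neighbours of the leading digit, then each further
--             # column to the right (top, own-row, bottom)
--             cells = [(i - 1, start - 1), (i - 1, start), (i - 1, start + 1),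
--                      (i, start - 1), (i, start + 1),
--                      (i + 1, start - 1), (i + 1, start), (i + 1, start + 1)]
--             for c in range(start + 2, j + 1):
--                 cells += [(i - 1, c), (i, c), (i + 1, c)]
--             for ai, aj in cells:
--                 if 0 <= ai < len(input) and 0 <= aj < len(input[ai]) and input[ai][aj] == '*':
--                     possible_gears.setdefault((ai, aj), []).append(value)
--     return possible_gears
-- ===== Notes on version B (the rewrite author's own statement) =====
-- stated objective: faster
-- what changed: A scans every digit and runs a 3x3 neighbour scan per digit, accumulating a per-number dedup set of star coordinates; B first extracts each row's numbers as (start, end, value) runs and then walks each number's border frame once (the leading digit's 8 neighbours plus one 3-cell column per further digit), which is duplicate-free by construction, appending via dict.setdefault.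
import Mathlib
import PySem

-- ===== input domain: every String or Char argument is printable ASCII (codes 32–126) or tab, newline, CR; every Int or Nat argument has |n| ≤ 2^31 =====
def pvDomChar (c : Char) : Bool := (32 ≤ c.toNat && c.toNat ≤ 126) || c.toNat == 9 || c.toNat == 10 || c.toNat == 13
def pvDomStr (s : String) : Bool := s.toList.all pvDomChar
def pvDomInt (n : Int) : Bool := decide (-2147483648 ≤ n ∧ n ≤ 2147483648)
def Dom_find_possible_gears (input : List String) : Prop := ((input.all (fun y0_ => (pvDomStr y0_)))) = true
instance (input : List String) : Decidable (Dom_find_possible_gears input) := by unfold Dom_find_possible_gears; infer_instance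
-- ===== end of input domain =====

-- B re-implements A in two passes (scan each row for whole numbers, then walk each
-- number's border cells once) instead of A's per-digit 3x3 neighbourhood scans with
-- per-number dedup sets; same return value, proved below.



-- ===== PORT A =====

def get_stars (i j : Int) (input : List String) : PySem.Set (Int × Int) :=
  (PySem.List.pyRange (i-1) (i+2) 1).foldl (fun stars ai =>
    (PySem.List.pyRange (j-1) (j+2) 1).foldl (fun stars aj =>
      if ai = i ∧ aj = j then stars
      else if ai < 0 ∨ PySem.List.len input - 1 < ai then stars
      else if aj < 0 ∨ PySem.Str.len (PySem.List.pyGetD input ai "") - 1 < aj then stars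
      else if ¬ (PySem.List.pyGetD (PySem.List.pyGetD input ai "").toList aj ' ' = '*') then stars
      else PySem.Set.add stars (ai, aj)) stars) PySem.Set.empty

def update_possible_gears (possible_gears : PySem.Dict (Int × Int) (List Int)) (n : Int)
    (star_coords : PySem.Set (Int × Int)) : PySem.Dict (Int × Int) (List Int) :=
  if PySem.Set.len star_coords < 1 then possible_gears
  else star_coords.foldl (fun pg coords =>
    let pg := if ¬ pg.contains coords then pg.insert coords ([] : List Int) else pg
    pg.insert coords (pg.getD coords [] ++ [n])) possible_gears

def find_possible_gears (input : List String) : List (Int × Int × List Int) :=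
  let final := (PySem.List.pyRange 0 (PySem.List.len input) 1).foldl (fun possible_gears i =>
    let row := PySem.List.pyGetD input i ""
    let st := (PySem.List.pyRange 0 (PySem.Str.len row) 1).foldl
      (fun (st : PySem.Dict (Int × Int) (List Int) × List Char × PySem.Set (Int × Int)) j =>
        let c := PySem.List.pyGetD row.toList j ' '
        if PySem.Chars.isdigit c then
          (st.1, st.2.1 ++ [c], PySem.Set.update st.2.2 (get_stars i j input))
        else
          ((if 0 < st.2.1.length then
              update_possible_gears st.1 ((PySem.Int.ofChars? st.2.1).getD 0) st.2.2
            else st.1), [], PySem.Set.empty))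
      (possible_gears, [], PySem.Set.empty)
    if 0 < st.2.1.length then
      update_possible_gears st.1 ((PySem.Int.ofChars? st.2.1).getD 0) st.2.2
    else st.1)
    PySem.Dict.empty
  final.items.map (fun kv => (kv.1.1, kv.1.2, kv.2))

-- ===== PORT B =====
def pvIsStar (input : List String) (cell : Int × Int) : Bool :=
  decide (0 ≤ cell.1) && decide (cell.1 < PySem.List.len input) &&
  decide (0 ≤ cell.2) && decide (cell.2 < PySem.Str.len (PySem.List.pyGetD input cell.1 "")) &&
  (PySem.List.pyGetD (PySem.List.pyGetD input cell.1 "").toList cell.2 ' ' == '*')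

def pvScanRow (cs : List Char) (j : Int) : List (Int × Int × Int) :=
  match cs with
  | [] => []
  | c :: rest =>
    if h : PySem.Chars.isdigit c then
      let run := (c :: rest).takeWhile PySem.Chars.isdigit
      (j, j + run.length - 1, (PySem.Int.ofChars? run).getD 0)
        :: pvScanRow ((c :: rest).dropWhile PySem.Chars.isdigit) (j + run.length)
    else pvScanRow rest (j + 1)
termination_by cs.length
decreasing_by
  · simp [h]
    exact List.length_dropWhile_le _ _
  · simp

def pvBorder (i s e : Int) : List (Int × Int) :=
  (PySem.List.pyRange (s+2) (e+2) 1).foldl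
    (fun acc c => acc ++ [(i-1, c), (i, c), (i+1, c)])
    [(i-1, s-1), (i-1, s), (i-1, s+1), (i, s-1), (i, s+1), (i+1, s-1), (i+1, s), (i+1, s+1)]

def find_possible_gears_alt (input : List String) : List (Int × Int × List Int) :=
  let final := input.zipIdx.foldl (fun possible_gears p =>
    let i : Int := p.2
    (pvScanRow p.1.toList 0).foldl (fun possible_gears num =>
      (pvBorder i num.1 num.2.1).foldl (fun pg cell =>
        if pvIsStar input cell then
          let pg := pg.setdefault cell ([] : List Int)
          pg.insert cell (pg.getD cell [] ++ [num.2.2])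
        else pg) possible_gears) possible_gears) PySem.Dict.empty
  final.items.map (fun kv => (kv.1.1, kv.1.2, kv.2))


-- ===== PRECONDITION & SPEC =====
def Spec_find_possible_gears (input : List String) (out : List (Int × Int × List Int)) : Prop := out = find_possible_gears_alt input
instance (input : List String) (out : List (Int × Int × List Int)) : Decidable (Spec_find_possible_gears input out) := by unfold Spec_find_possible_gears; infer_instance

-- ===== CLAIM (what is proved, stated in full; the proofs are below) =====
def Claim_equal_find_possible_gears : Prop := ∀ (input : List String), Dom_find_possible_gears input → Spec_find_possible_gears input (find_possible_gears input)

-- ===== LEMMAS AND PROOFS =====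
def pvCand (i j : Int) : List (Int × Int) :=
  [(i-1,j-1),(i-1,j),(i-1,j+1),(i,j-1),(i,j+1),(i+1,j-1),(i+1,j),(i+1,j+1)]

def pvApp (n : Int) (pg : PySem.Dict (Int × Int) (List Int)) (c : Int × Int) :
    PySem.Dict (Int × Int) (List Int) :=
  let pg := pg.setdefault c ([] : List Int)
  pg.insert c (pg.getD c [] ++ [n])

theorem pvBorderFlat (i s e : Int) :
    pvBorder i s e =
      [(i-1,s-1),(i-1,s),(i-1,s+1),(i,s-1),(i,s+1),(i+1,s-1),(i+1,s),(i+1,s+1)] ++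
        (PySem.List.pyRange (s+2) (e+2) 1).flatMap (fun c => [(i-1,c),(i,c),(i+1,c)]) := by
  unfold pvBorder
  rw [PySem.List.foldl_append_eq_flatMap]

theorem pvUpdEq (pg : PySem.Dict (Int × Int) (List Int)) (n : Int) (S : PySem.Set (Int × Int)) :
    update_possible_gears pg n S = S.foldl (pvApp n) pg := by
  unfold update_possible_gears
  have hbody : ∀ (pg : PySem.Dict (Int × Int) (List Int)) (c : Int × Int),
      (let pg1 := if ¬ pg.contains c then pg.insert c ([] : List Int) else pg
       pg1.insert c (pg1.getD c [] ++ [n])) = pvApp n pg c := by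
    intro pg c
    unfold pvApp
    by_cases h : pg.contains c
    · simp only [h, not_true, if_neg, PySem.Dict.setdefault_of_contains _ _ h]
      simp [h]
    · simp only [Bool.not_eq_true] at h
      rw [PySem.Dict.setdefault_of_not_contains _ _ h]
      simp [h]
  by_cases hS : PySem.Set.len S < 1
  · have : S = [] := by
      cases S with
      | nil => rfl
      | cons a t => simp [PySem.Set.len, PySem.List.len] at hS; omega
    simp [this, hS]
  · rw [if_neg hS]
    exact PySem.List.foldl_congr_mem _ _ _ _ (fun acc x _ => hbody acc x)

theorem pvGS (input : List String) (i j : Int) :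
    get_stars i j input = (pvCand i j).filter (pvIsStar input) := by
  have hr3 : ∀ a : Int, PySem.List.pyRange a (a+3) 1 = [a, a+1, a+1+1] := by
    intro a
    rw [PySem.List.pyRange_one_cons (by omega), PySem.List.pyRange_one_cons (by omega),
        PySem.List.pyRange_one_cons (by omega), PySem.List.pyRange_one_eq_nil (by omega)]
  have hi : i + 2 = (i-1) + 3 := by ring
  have hj : j + 2 = (j-1) + 3 := by ring
  have ei : i - 1 + 1 = i := by ring
  have ej : j - 1 + 1 = j := by ring
  unfold get_stars
  rw [hi, hj, hr3, hr3, ei, ej]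
  have hstep : ∀ (ai aj : Int) (s : PySem.Set (Int × Int)),
      (if ai = i ∧ aj = j then s
       else if ai < 0 ∨ PySem.List.len input - 1 < ai then s
       else if aj < 0 ∨ PySem.Str.len (PySem.List.pyGetD input ai "") - 1 < aj then s
       else if ¬ (PySem.List.pyGetD (PySem.List.pyGetD input ai "").toList aj ' ' = '*') then s
       else PySem.Set.add s (ai, aj))
      = if (!decide (ai = i ∧ aj = j) && pvIsStar input (ai, aj)) then PySem.Set.add s (ai,aj) else s := by
    intro ai aj s
    have hPiff : pvIsStar input (ai, aj) = true ↔
        ((0 ≤ ai ∧ ai < PySem.List.len input) ∧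
         (0 ≤ aj ∧ aj < PySem.Str.len (PySem.List.pyGetD input ai "")) ∧
         PySem.List.pyGetD (PySem.List.pyGetD input ai "").toList aj ' ' = '*') := by
      simp [pvIsStar, and_assoc]
    by_cases hc : ai = i ∧ aj = j
    · simp [hc]
    · simp only [if_neg hc, decide_eq_false hc, Bool.not_false, Bool.true_and]
      by_cases hP : pvIsStar input (ai, aj) = true
      · obtain ⟨hA, hB, hC⟩ := hPiff.mp hP
        rw [if_neg (by omega), if_neg (by omega), if_neg (by simp [hC]), hP, if_pos rfl]
      · have hP' : pvIsStar input (ai,aj) = false := by simpa using hP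
        rw [hP']
        simp only [Bool.false_eq_true, if_false]
        split_ifs with g1 g2 g3
        · rfl
        · rfl
        · exact absurd (hPiff.mpr ⟨by omega, by omega, g3⟩) hP
        · rfl
  have hq : ∀ (a b : Int), ¬(a = i ∧ b = j) →
      (!decide (a = i ∧ b = j) && pvIsStar input (a,b)) = pvIsStar input (a,b) := by
    intro a b h; simp [h]
  have hcen : (!decide (i = i ∧ j = j) && pvIsStar input (i,j)) = false := by simp
  suffices hsuf : List.foldl (fun s (x : Int × Int) =>
      if (!decide (x.1 = i ∧ x.2 = j) && pvIsStar input x) = true then PySem.Set.add s x else s)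
      PySem.Set.empty
      [(i-1,j-1),(i-1,j),(i-1,j+1),(i,j-1),(i,j),(i,j+1),(i+1,j-1),(i+1,j),(i+1,j+1)]
    = (pvCand i j).filter (pvIsStar input) by
    simpa only [List.foldl_cons, List.foldl_nil, hstep] using hsuf
  rw [PySem.List.foldl_if_eq_foldl_filter]
  have hupd : ∀ l : List (Int × Int),
      List.foldl PySem.Set.add PySem.Set.empty l = PySem.Set.empty.update l := fun l => rfl
  rw [hupd, PySem.Set.update_empty]
  have hfil : List.filter (fun (x : Int × Int) => !decide (x.1 = i ∧ x.2 = j) && pvIsStar input x)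
      [(i-1,j-1),(i-1,j),(i-1,j+1),(i,j-1),(i,j),(i,j+1),(i+1,j-1),(i+1,j),(i+1,j+1)]
      = (pvCand i j).filter (pvIsStar input) := by
    simp only [pvCand, List.filter_cons, List.filter_nil,
      hq (i-1) (j-1) (by omega), hq (i-1) j (by omega), hq (i-1) (j+1) (by omega),
      hq i (j-1) (by omega), hq i (j+1) (by omega),
      hq (i+1) (j-1) (by omega), hq (i+1) j (by omega), hq (i+1) (j+1) (by omega), hcen]
    simp
  rw [hfil]
  apply PySem.Set.ofList_eq_self_of_nodup
  apply List.Nodup.filter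
  simp [pvCand, List.nodup_cons, Prod.ext_iff]
  omega

def pvCandConcat (i s : Int) : Nat → List (Int × Int)
  | 0 => []
  | n+1 => pvCandConcat i s n ++ pvCand i (s + n)

def pvDedupC (i s : Int) : Nat → List (Int × Int)
  | 0 => []
  | 1 => pvCand i s
  | n+1 => pvDedupC i s n ++
      (if n = 1 then [(i-1,s+2),(i,s),(i,s+2),(i+1,s+2)]
       else [(i-1,s+(n:Int)+1),(i,s+(n:Int)+1),(i+1,s+(n:Int)+1)])

theorem pvMemCandConcat (i s : Int) (n : Nat) (hn : 1 ≤ n) (r c : Int) :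
    ((r,c) ∈ pvCandConcat i s n ↔
      ((r = i-1 ∨ r = i+1) ∧ s-1 ≤ c ∧ c ≤ s+n) ∨
      (r = i ∧ ((s-1 ≤ c ∧ c ≤ s+(n:Int)-2) ∨ (s+1 ≤ c ∧ c ≤ s+n)))) := by
  induction n with
  | zero => omega
  | succ m ih =>
    by_cases hm : m = 0
    · subst hm
      show (r,c) ∈ pvCandConcat i s 0 ++ pvCand i (s + 0) ↔ _
      simp only [pvCandConcat, List.nil_append, pvCand, List.mem_cons,
        Prod.mk.injEq, List.not_mem_nil, or_false]
      push_cast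
      omega
    · have hm1 : 1 ≤ m := by omega
      show (r,c) ∈ pvCandConcat i s m ++ pvCand i (s + m) ↔ _
      rw [List.mem_append, ih hm1]
      simp only [pvCand, List.mem_cons, Prod.mk.injEq, List.not_mem_nil, or_false]
      push_cast
      omega

theorem pvDedup (i s : Int) (n : Nat) (hn : 1 ≤ n) :
    PySem.Set.ofList (pvCandConcat i s n) = pvDedupC i s n := by
  induction n with
  | zero => omega
  | succ m ih =>
    by_cases hm : m = 0
    · subst hm
      show PySem.Set.ofList (pvCandConcat i s 0 ++ pvCand i (s + 0)) = pvCand i s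
      rw [show pvCandConcat i s 0 = [] from rfl, List.nil_append]
      norm_num
      apply PySem.Set.ofList_eq_self_of_nodup
      simp [pvCand, List.nodup_cons, Prod.ext_iff]
      omega
    · have hm1 : 1 ≤ m := by omega
      show PySem.Set.ofList (pvCandConcat i s m ++ pvCand i (s + m)) = pvDedupC i s (m+1)
      rw [PySem.Set.ofList_append, ih hm1, PySem.Set.update_eq_append_filter]
      have hofl : PySem.Set.ofList (pvCand i (s+m)) = pvCand i (s+m) := by
        apply PySem.Set.ofList_eq_self_of_nodup
        simp [pvCand, List.nodup_cons, Prod.ext_iff]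
        omega
      rw [hofl]
      have hcont : ∀ x : Int × Int, PySem.Set.contains (pvDedupC i s m) x =
          decide (x ∈ pvCandConcat i s m) := by
        intro x
        have hmm : x ∈ pvDedupC i s m ↔ x ∈ pvCandConcat i s m := by
          rw [← ih hm1, PySem.Set.mem_ofList]
        by_cases hx : x ∈ pvCandConcat i s m
        · rw [decide_eq_true hx]
          exact (PySem.Set.contains_iff _ _).mpr (hmm.mpr hx)
        · rw [decide_eq_false hx]
          by_contra hcc
          simp only [Bool.not_eq_false] at hcc
          exact hx (hmm.mp ((PySem.Set.contains_iff _ _).mp hcc))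
      -- decide memberships of the eight cells of pvCand i (s+m)
      have M := fun (r c : Int) => pvMemCandConcat i s m hm1 r c
      obtain ⟨m', rfl⟩ : ∃ m', m = m'+1 := ⟨m-1, by omega⟩
      rw [show pvDedupC i s (m'+1+1) = pvDedupC i s (m'+1) ++
          (if m'+1 = 1 then [(i-1,s+2),(i,s),(i,s+2),(i+1,s+2)]
           else [(i-1,s+((m'+1:Nat):Int)+1),(i,s+((m'+1:Nat):Int)+1),(i+1,s+((m'+1:Nat):Int)+1)])
        from rfl]
      congr 1
      simp only [pvCand, List.filter_cons, List.filter_nil, hcont]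
      by_cases h2 : m'+1 = 1
      · rw [if_pos h2]
        obtain rfl : m' = 0 := by omega
        rw [decide_eq_true ((M _ _).mpr (by omega)),  -- (i-1, s+1-1) = (i-1,s) ∈ C1
            decide_eq_true ((M _ _).mpr (by omega)),  -- (i-1, s+1)
            decide_eq_false (fun h => by have := (M _ _).mp h; omega),
            decide_eq_false (fun h => by have := (M _ _).mp h; omega),
            decide_eq_false (fun h => by have := (M _ _).mp h; omega),
            decide_eq_true ((M _ _).mpr (by omega)),
            decide_eq_true ((M _ _).mpr (by omega)),
            decide_eq_false (fun h => by have := (M _ _).mp h; omega)]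
        push_cast
        norm_num
        omega
      · rw [decide_eq_true ((M _ _).mpr (by omega)),
            decide_eq_true ((M _ _).mpr (by omega)),
            decide_eq_false (fun h => by have := (M _ _).mp h; omega),
            decide_eq_true ((M _ _).mpr (by omega)),  -- (i, s+m-1) ∈ C m since m ≥ 2
            decide_eq_false (fun h => by have := (M _ _).mp h; omega),
            decide_eq_true ((M _ _).mpr (by omega)),
            decide_eq_true ((M _ _).mpr (by omega)),
            decide_eq_false (fun h => by have := (M _ _).mp h; omega)]
        rw [if_neg h2]
        push_cast
        norm_num

theorem pvFilterBorder (input : List String) (i s : Int) (n : Nat) (hn : 1 ≤ n)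
    (hP : ∀ c : Int, s ≤ c → c ≤ s+(n:Int)-1 → pvIsStar input (i, c) = false) :
    (pvDedupC i s n).filter (pvIsStar input) =
      (pvBorder i s (s+(n:Int)-1)).filter (pvIsStar input) := by
  induction n with
  | zero => omega
  | succ m ih =>
    rw [pvBorderFlat]
    by_cases hm : m = 0
    · subst hm
      rw [PySem.List.pyRange_one_eq_nil (by push_cast; omega)]
      simp only [List.flatMap_nil, List.append_nil]
      rfl
    · have hm1 : 1 ≤ m := by omega
      obtain ⟨m', rfl⟩ : ∃ m', m = m'+1 := ⟨m-1, by omega⟩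
      have hPm : ∀ c : Int, s ≤ c → c ≤ s+((m'+1:Nat):Int)-1 → pvIsStar input (i, c) = false := by
        intro c h1 h2; exact hP c h1 (by push_cast at h2 ⊢; omega)
      have ihm := ih hm1 hPm
      rw [pvBorderFlat] at ihm
      have hsplit : PySem.List.pyRange (s+2) (s+((m'+1+1:Nat):Int)-1+2) 1 =
          PySem.List.pyRange (s+2) (s+((m'+1:Nat):Int)-1+2) 1 ++ [s+((m'+1:Nat):Int)+1] := by
        have h1 : s+((m'+1+1:Nat):Int)-1+2 = (s+((m'+1:Nat):Int)+1) + 1 := by push_cast; ring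
        have h2 : s+((m'+1:Nat):Int)-1+2 = s+((m'+1:Nat):Int)+1 := by push_cast; ring
        rw [h1, PySem.List.pyRange_one_succ_right (by push_cast; omega), h2]
      rw [hsplit, List.flatMap_append, ← List.append_assoc, List.filter_append,
        ← ihm]
      rw [show pvDedupC i s (m'+1+1) = pvDedupC i s (m'+1) ++
          (if m'+1 = 1 then [(i-1,s+2),(i,s),(i,s+2),(i+1,s+2)]
           else [(i-1,s+((m'+1:Nat):Int)+1),(i,s+((m'+1:Nat):Int)+1),(i+1,s+((m'+1:Nat):Int)+1)])
        from rfl, List.filter_append]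
      congr 1
      by_cases h2 : m' = 0
      · subst h2
        rw [if_pos rfl]
        have hPs : pvIsStar input (i, s) = false := hP s (by omega) (by push_cast; omega)
        simp only [List.flatMap_cons, List.flatMap_nil, List.append_nil, List.filter_cons,
          List.filter_nil, hPs]
        push_cast
        norm_num
        rw [show s + 1 + 1 = s + 2 by ring]
      · rw [if_neg (by omega)]
        simp only [List.flatMap_cons, List.flatMap_nil, List.append_nil]


theorem pvOfListFilter {α : Type} [BEq α] [LawfulBEq α] (p : α → Bool) (l : List α) :
    PySem.Set.ofList (l.filter p) = (PySem.Set.ofList l).filter p := by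
  induction l using List.reverseRecOn with
  | nil => simp [PySem.Set.ofList]
  | append_singleton ys y ih =>
    rw [List.filter_append, PySem.Set.ofList_append_singleton, PySem.Set.add_eq_ite]
    by_cases hp : p y
    · by_cases hmem : y ∈ PySem.Set.ofList ys
      · have h2 : y ∈ PySem.Set.ofList (List.filter p ys) := by
          rw [PySem.Set.mem_ofList] at *
          exact List.mem_filter.mpr ⟨hmem, hp⟩
        simp only [List.filter_cons, hp, List.filter_nil, if_pos hmem, if_true]
        rw [PySem.Set.ofList_append_singleton, PySem.Set.add_eq_ite, if_pos h2, ih]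
      · have h2 : y ∉ PySem.Set.ofList (List.filter p ys) := by
          rw [PySem.Set.mem_ofList] at *
          exact fun h => hmem (List.mem_filter.mp h).1
        simp only [List.filter_cons, hp, List.filter_nil, if_neg hmem, if_true]
        rw [PySem.Set.ofList_append_singleton, PySem.Set.add_eq_ite, if_neg h2, ih,
            List.filter_append]
        simp [hp]
    · by_cases hmem : y ∈ PySem.Set.ofList ys
      · simp only [List.filter_cons, hp, List.filter_nil, if_pos hmem]
        simpa using ih
      · simp only [List.filter_cons, hp, List.filter_nil, if_neg hmem, if_false,
          Bool.false_eq_true, List.append_nil]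
        rw [ih, List.filter_append]
        simp [hp]


theorem pvBridge {β : Type} (xs : List String) (g : β → Int → String → β) (init : β) :
    (PySem.List.pyRange 0 (PySem.List.len xs) 1).foldl
        (fun acc i => g acc i (PySem.List.pyGetD xs i "")) init =
      xs.zipIdx.foldl (fun acc p => g acc (p.2 : Int) p.1) init := by
  induction xs using List.reverseRecOn generalizing init with
  | nil => simp [PySem.List.len, PySem.List.pyRange_one_eq_nil]
  | append_singleton ys y ih =>
    rw [PySem.List.len_eq] at *
    have h1 : ((ys ++ [y]).length : Int) = (ys.length : Int) + 1 := by simp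
    rw [h1, PySem.List.pyRange_one_succ_right (by positivity), List.foldl_append,
        List.zipIdx_append, List.foldl_append]
    have h2 : (PySem.List.pyRange 0 (ys.length : Int) 1).foldl
        (fun acc i => g acc i (PySem.List.pyGetD (ys ++ [y]) i "")) init
        = (PySem.List.pyRange 0 (ys.length : Int) 1).foldl
        (fun acc i => g acc i (PySem.List.pyGetD ys i "")) init := by
      apply PySem.List.foldl_congr_mem
      intro acc x hx
      rw [PySem.List.mem_pyRange_one] at hx
      have hxn : x = ((x.toNat : Nat) : Int) := by omega
      rw [hxn, PySem.List.pyGetD_natCast, PySem.List.pyGetD_natCast]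
      congr 1
      rw [List.getD_eq_getElem?_getD, List.getD_eq_getElem?_getD,
          List.getElem?_append_left (by omega)]
    rw [h2, ih]
    simp [PySem.List.pyGetD_natCast]


def pvStepA (input : List String) (i : Int) (row : String)
    (st : PySem.Dict (Int × Int) (List Int) × List Char × PySem.Set (Int × Int)) (j : Int) :
    PySem.Dict (Int × Int) (List Int) × List Char × PySem.Set (Int × Int) :=
  let c := PySem.List.pyGetD row.toList j ' '
  if PySem.Chars.isdigit c then
    (st.1, st.2.1 ++ [c], PySem.Set.update st.2.2 (get_stars i j input))
  else
    ((if 0 < st.2.1.length then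
        update_possible_gears st.1 ((PySem.Int.ofChars? st.2.1).getD 0) st.2.2
      else st.1), [], PySem.Set.empty)

def pvBodyB (input : List String) (i : Int)
    (possible_gears : PySem.Dict (Int × Int) (List Int)) (num : Int × Int × Int) :
    PySem.Dict (Int × Int) (List Int) :=
  (pvBorder i num.1 num.2.1).foldl (fun pg cell =>
    if pvIsStar input cell then
      let pg := pg.setdefault cell ([] : List Int)
      pg.insert cell (pg.getD cell [] ++ [num.2.2])
    else pg) possible_gears

theorem pvCoords (input : List String) (i s : Int) (n : Nat) :
    (PySem.List.pyRange s (s+(n:Int)) 1).foldl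
        (fun S jj => PySem.Set.update S (get_stars i jj input)) PySem.Set.empty =
      PySem.Set.ofList ((pvCandConcat i s n).filter (pvIsStar input)) := by
  induction n with
  | zero =>
    rw [PySem.List.pyRange_one_eq_nil (by push_cast; omega)]
    rfl
  | succ m ih =>
    have hsplit : PySem.List.pyRange s (s+((m+1:Nat):Int)) 1 =
        PySem.List.pyRange s (s+(m:Nat)) 1 ++ [s+(m:Nat)] := by
      have h1 : s+((m+1:Nat):Int) = (s+(m:Nat)) + 1 := by push_cast; ring
      rw [h1, PySem.List.pyRange_one_succ_right (by push_cast; omega)]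
    rw [hsplit, List.foldl_append, ih, List.foldl_cons, List.foldl_nil, pvGS]
    rw [show pvCandConcat i s (m+1) = pvCandConcat i s m ++ pvCand i (s+(m:Nat)) from rfl,
      List.filter_append, PySem.Set.ofList_append]

theorem pvNum (input : List String) (i s : Int) (n : Nat) (hn : 1 ≤ n) (v : Int)
    (pg : PySem.Dict (Int × Int) (List Int))
    (hP : ∀ c : Int, s ≤ c → c ≤ s+(n:Int)-1 → pvIsStar input (i, c) = false) :
    update_possible_gears pg v
        ((PySem.List.pyRange s (s+(n:Int)) 1).foldl
          (fun S jj => PySem.Set.update S (get_stars i jj input)) PySem.Set.empty) =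
      pvBodyB input i pg (s, s+(n:Int)-1, v) := by
  rw [pvCoords, pvOfListFilter, pvDedup i s n hn, pvFilterBorder input i s n hn hP, pvUpdEq]
  unfold pvBodyB
  rw [← PySem.List.foldl_if_eq_foldl_filter (pvIsStar input) (pvApp v)]
  rfl

theorem pvRun (input : List String) (i : Int) (row : String) :
    ∀ (r : List Char) (a : Nat) (pg : PySem.Dict (Int × Int) (List Int))
      (ns : List Char) (S : PySem.Set (Int × Int)),
      (∀ m (hm : m < r.length), row.toList.getD (a+m) ' ' = r[m]) →
      (∀ c ∈ r, PySem.Chars.isdigit c = true) →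
      (PySem.List.pyRange a (a + r.length : Nat) 1).foldl (pvStepA input i row) (pg, ns, S) =
        (pg, ns ++ r,
          (PySem.List.pyRange a (a + r.length : Nat) 1).foldl
            (fun S jj => PySem.Set.update S (get_stars i jj input)) S) := by
  intro r
  induction r with
  | nil =>
    intro a pg ns S hchars hdig
    rw [PySem.List.pyRange_one_eq_nil (by simp)]
    simp
  | cons c r' ih =>
    intro a pg ns S hchars hdig
    have hcons : PySem.List.pyRange (a:Int) ((a + (c :: r').length : Nat) : Int) 1
        = (a:Int) :: PySem.List.pyRange ((a+1 : Nat) : Int) (((a+1) + r'.length : Nat) : Int) 1 := by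
      rw [show (a + (c :: r').length) = ((a+1) + r'.length) from by simp; omega,
        PySem.List.pyRange_one_cons (by push_cast; omega),
        show ((a:Int) + 1) = ((a+1 : Nat) : Int) from by push_cast; ring]
    rw [hcons]
    simp only [List.foldl_cons]
    have h0 : PySem.List.pyGetD row.toList (a:Int) ' ' = c := by
      have h := hchars 0 (by simp)
      simp only [Nat.add_zero, List.getElem_cons_zero] at h
      rw [PySem.List.pyGetD_natCast, h]
    have hstep : pvStepA input i row (pg, ns, S) (a:Int)
        = (pg, ns ++ [c], PySem.Set.update S (get_stars i (a:Int) input)) := by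
      simp [pvStepA, h0, hdig c (by simp)]
    rw [hstep]
    have hchars' : ∀ m (hm : m < r'.length), row.toList.getD ((a+1)+m) ' ' = r'[m] := by
      intro m hm
      have h := hchars (m+1) (by simp; omega)
      simpa [Nat.add_comm, Nat.add_assoc, Nat.add_left_comm] using h
    have hdig' : ∀ x ∈ r', PySem.Chars.isdigit x = true := fun x hx => hdig x (by simp [hx])
    rw [ih (a+1) pg (ns ++ [c]) (PySem.Set.update S (get_stars i (a:Int) input)) hchars' hdig']
    simp

theorem pvRow (input : List String) (k : Nat) (row : String) (hk : input[k]? = some row) :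
    ∀ (fuel j : Nat) (pg : PySem.Dict (Int × Int) (List Int)),
      row.toList.length - j ≤ fuel →
      (let st := (PySem.List.pyRange j (PySem.Str.len row) 1).foldl
          (pvStepA input k row) (pg, ([] : List Char), PySem.Set.empty)
       if 0 < st.2.1.length then
         update_possible_gears st.1 ((PySem.Int.ofChars? st.2.1).getD 0) st.2.2
       else st.1) =
      (pvScanRow (row.toList.drop j) j).foldl (pvBodyB input k) pg := by
  intro fuel
  induction fuel with
  | zero =>
    intro j pg hf
    have hj : row.toList.length ≤ j := by omega
    rw [PySem.Str.len_eq, PySem.List.pyRange_one_eq_nil (by exact_mod_cast hj),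
      List.drop_eq_nil_iff.mpr hj]
    simp [pvScanRow]
  | succ f ihf =>
    intro j pg hf
    by_cases hj : row.toList.length ≤ j
    · rw [PySem.Str.len_eq, PySem.List.pyRange_one_eq_nil (by exact_mod_cast hj),
        List.drop_eq_nil_iff.mpr hj]
      simp [pvScanRow]
    · rw [not_le] at hj
      rcases hcd : row.toList.drop j with _ | ⟨c, rest⟩
      · rw [List.drop_eq_nil_iff] at hcd; omega
      · have hc : row.toList[j]? = some c := by
          have h := List.getElem?_drop (xs := row.toList) (i := j) (j := 0)
          rw [hcd] at h
          simpa using h.symm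
        have hgD : row.toList.getD j ' ' = c := by
          rw [List.getD_eq_getElem?_getD, hc]; rfl
        by_cases hcdig : PySem.Chars.isdigit c = true
        · -- digit: a run starts here
          set tw := (c :: rest).takeWhile PySem.Chars.isdigit with htw
          have hrne : tw = c :: rest.takeWhile PySem.Chars.isdigit := by
            rw [htw, List.takeWhile_cons, if_pos hcdig]
          have hrl1 : 1 ≤ tw.length := by rw [hrne]; simp
          have hclen : (c :: rest).length = row.toList.length - j := by
            rw [← hcd, List.length_drop]
          have hrlle : tw.length ≤ row.toList.length - j := by
            have h1 := (List.takeWhile_prefix (l := c :: rest) PySem.Chars.isdigit).length_le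
            rw [← htw] at h1
            omega
          have hsplit0 : tw ++ (c :: rest).dropWhile PySem.Chars.isdigit = c :: rest := by
            rw [htw, List.takeWhile_append_dropWhile]
          have hdw : (c :: rest).dropWhile PySem.Chars.isdigit = row.toList.drop (j + tw.length) := by
            have h1 : row.toList.drop (j + tw.length) = (row.toList.drop j).drop tw.length := by
              rw [List.drop_drop, Nat.add_comm]
            rw [h1, hcd]
            conv_rhs => rw [← hsplit0]
            rw [List.drop_left]
          have hchars : ∀ m (hm : m < tw.length), row.toList.getD (j+m) ' ' = tw[m] := by
            intro m hm
            have h2 : row.toList[j+m]? = (c :: rest)[m]? := by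
              rw [← hcd, List.getElem?_drop]
            calc row.toList.getD (j+m) ' ' = (row.toList[j+m]?).getD ' ' :=
                  List.getD_eq_getElem?_getD
              _ = ((c :: rest)[m]?).getD ' ' := by rw [h2]
              _ = ((tw ++ (c :: rest).dropWhile PySem.Chars.isdigit)[m]?).getD ' ' := by
                  rw [hsplit0]
              _ = (tw[m]?).getD ' ' := by rw [List.getElem?_append_left hm]
              _ = tw[m] := by rw [List.getElem?_eq_getElem hm, Option.getD_some]
          have hdig : ∀ ch ∈ tw, PySem.Chars.isdigit ch = true := fun ch hch =>
            List.mem_takeWhile_imp hch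
          have hrowk : PySem.List.pyGetD input (k:Int) "" = row := by
            rw [PySem.List.pyGetD_natCast, List.getD_eq_getElem?_getD, hk]
            rfl
          have hP : ∀ cc : Int, (j:Int) ≤ cc → cc ≤ (j:Int) + (tw.length:Int) - 1 →
              pvIsStar input ((k:Int), cc) = false := by
            intro cc h1 h2
            obtain ⟨m, hm, rfl⟩ : ∃ m : Nat, m < tw.length ∧ cc = ((j+m : Nat) : Int) :=
              ⟨(cc - j).toNat, by omega, by push_cast; omega⟩
            have hch : row.toList.getD (j+m) ' ' = tw[m] := hchars m hm
            have hdigm : PySem.Chars.isdigit tw[m] = true := hdig _ (List.getElem_mem _)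
            have hne : (tw[m] == '*') = false := by
              have hne' : tw[m] ≠ '*' := by
                intro he
                rw [he] at hdigm
                exact absurd hdigm (by decide)
              exact beq_eq_false_iff_ne.mpr hne'
            unfold pvIsStar
            simp only [hrowk, PySem.List.pyGetD_natCast, List.getD_eq_getElem?_getD]
            rw [← List.getD_eq_getElem?_getD, hch, hne]
            simp
          have hsplit : PySem.List.pyRange (j:Int) (PySem.Str.len row) 1 =
              PySem.List.pyRange (j:Int) ((j + tw.length : Nat) : Int) 1 ++
              PySem.List.pyRange ((j + tw.length : Nat) : Int) ((row.toList.length : Nat) : Int) 1 := by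
            rw [PySem.Str.len_eq]
            exact PySem.List.pyRange_one_append _ _ _ (by push_cast; omega) (by push_cast; omega)
          rw [hsplit, List.foldl_append, pvRun input (k:Int) row tw j pg [] PySem.Set.empty hchars hdig]
          simp only [List.nil_append]
          have hnum : update_possible_gears pg ((PySem.Int.ofChars? tw).getD 0)
              (List.foldl (fun S jj => PySem.Set.update S (get_stars (k:Int) jj input))
                PySem.Set.empty (PySem.List.pyRange (j:Int) ((j + tw.length : Nat) : Int) 1)) =
              pvBodyB input (k:Int) pg ((j:Int), (j:Int) + (tw.length:Int) - 1,
                (PySem.Int.ofChars? tw).getD 0) := by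
            rw [show ((j + tw.length : Nat) : Int) = (j:Int) + (tw.length:Int) by push_cast; ring]
            exact pvNum input (k:Int) (j:Int) tw.length hrl1 _ pg hP
          have hscan : pvScanRow (c :: rest) (j:Int) =
              ((j:Int), (j:Int) + (tw.length:Int) - 1, (PySem.Int.ofChars? tw).getD 0)
                :: pvScanRow ((c :: rest).dropWhile PySem.Chars.isdigit) ((j:Int) + (tw.length:Int)) := by
            rw [pvScanRow]
            simp [hcdig, ← htw]
          cases hrest : row.toList.drop (j + tw.length) with
          | nil =>
            have hend : row.toList.length ≤ j + tw.length := List.drop_eq_nil_iff.mp hrest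
            rw [PySem.List.pyRange_one_eq_nil (a := ((j + tw.length : Nat) : Int))
              (b := ((row.toList.length : Nat) : Int)) (by push_cast; omega), List.foldl_nil]
            simp only
            rw [if_pos (show 0 < tw.length by omega)]
            rw [hscan, hdw, hrest]
            simp only [pvScanRow, List.foldl_cons, List.foldl_nil]
            exact hnum
          | cons c' rest' =>
            have hc'dig : PySem.Chars.isdigit c' = false := by
              have hne : (c :: rest).dropWhile PySem.Chars.isdigit ≠ [] := by
                rw [hdw, hrest]; simp
              have h := List.head_dropWhile_not (p := PySem.Chars.isdigit) (l := c :: rest) hne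
              simp only [hdw, hrest, List.head_cons] at h
              simpa using h
            have hlt : j + tw.length < row.toList.length := by
              by_contra hge
              rw [List.drop_eq_nil_iff.mpr (by omega)] at hrest
              exact List.cons_ne_nil c' rest' hrest.symm
            have hc' : row.toList.getD (j + tw.length) ' ' = c' := by
              have h := List.getElem?_drop (xs := row.toList) (i := j + tw.length) (j := 0)
              rw [hrest] at h
              rw [List.getD_eq_getElem?_getD, ← Nat.add_zero (j + tw.length), h.symm]
              rfl
            have hcons2 : PySem.List.pyRange ((j + tw.length : Nat) : Int) ((row.toList.length : Nat) : Int) 1 =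
                ((j + tw.length : Nat) : Int) ::
                  PySem.List.pyRange ((j + tw.length + 1 : Nat) : Int) ((row.toList.length : Nat) : Int) 1 := by
              rw [PySem.List.pyRange_one_cons (by push_cast; omega),
                show (((j + tw.length : Nat) : Int) + 1) = ((j + tw.length + 1 : Nat) : Int) by push_cast; ring]
            rw [hcons2, List.foldl_cons]
            have hstep2 : pvStepA input (k:Int) row
                (pg, tw, (List.foldl (fun S jj => PySem.Set.update S (get_stars (k:Int) jj input))
                  PySem.Set.empty (PySem.List.pyRange (j:Int) ((j + tw.length : Nat) : Int) 1)))
                ((j + tw.length : Nat) : Int)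
                = (update_possible_gears pg ((PySem.Int.ofChars? tw).getD 0)
                    (List.foldl (fun S jj => PySem.Set.update S (get_stars (k:Int) jj input))
                      PySem.Set.empty (PySem.List.pyRange (j:Int) ((j + tw.length : Nat) : Int) 1)),
                   ([] : List Char), PySem.Set.empty) := by
              simp only [pvStepA, PySem.List.pyGetD_natCast]
              rw [hc']
              simp [hc'dig, (show 0 < tw.length by omega)]
            rw [hstep2]
            have hrec := ihf (j + tw.length + 1) (update_possible_gears pg ((PySem.Int.ofChars? tw).getD 0)
              (List.foldl (fun S jj => PySem.Set.update S (get_stars (k:Int) jj input))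
                PySem.Set.empty (PySem.List.pyRange (j:Int) ((j + tw.length : Nat) : Int) 1))) (by omega)
            have hrest' : row.toList.drop (j + tw.length + 1) = rest' := by
              have h1 : row.toList.drop (j + tw.length + 1) = (row.toList.drop (j + tw.length)).drop 1 := by
                rw [List.drop_drop]
              rw [h1, hrest]
              rfl
            have hscan2 : pvScanRow (c' :: rest') ((j:Int) + (tw.length:Int)) =
                pvScanRow rest' (((j:Int) + (tw.length:Int)) + 1) := by
              rw [pvScanRow]
              simp [hc'dig]
            refine hrec.trans ?_
            rw [hscan, hdw, hrest, hrest', hscan2, List.foldl_cons, hnum,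
              show (((j:Int) + (tw.length:Int)) + 1) = ((j + tw.length + 1 : Nat) : Int) by push_cast; ring]
        · -- non-digit: state stays empty
          have hcons : PySem.List.pyRange (j:Int) (PySem.Str.len row) 1
              = (j:Int) :: PySem.List.pyRange ((j+1:Nat):Int) (PySem.Str.len row) 1 := by
            rw [PySem.Str.len_eq, PySem.List.pyRange_one_cons (by exact_mod_cast hj)]
            norm_num
          rw [hcons]
          simp only [List.foldl_cons]
          have hstep : pvStepA input (k:Int) row
              (pg, ([] : List Char), PySem.Set.empty) (j:Int)
              = (pg, ([] : List Char), PySem.Set.empty) := by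
            have hcdig' : PySem.Chars.isdigit c = false := by simpa using hcdig
            simp [pvStepA, PySem.List.pyGetD_natCast, hc, hcdig']
          rw [hstep]
          have hrec := ihf (j+1) pg (by omega)
          rw [hrec]
          have hdrop1 : row.toList.drop (j+1) = rest := by
            have : row.toList.drop (j+1) = (row.toList.drop j).drop 1 := by
              rw [List.drop_drop]
            rw [this, hcd]; rfl
          rw [hdrop1]
          have hscan : pvScanRow (c :: rest) (j:Int) = pvScanRow rest ((j:Int)+1) := by
            rw [pvScanRow]
            simp [hcdig]
          rw [hscan, show ((j:Int)+1) = ((j+1:Nat):Int) by push_cast; ring]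

def pvRowA (input : List String) (pg : PySem.Dict (Int × Int) (List Int)) (i : Int)
    (row : String) : PySem.Dict (Int × Int) (List Int) :=
  let st := (PySem.List.pyRange 0 (PySem.Str.len row) 1).foldl (pvStepA input i row)
    (pg, ([] : List Char), PySem.Set.empty)
  if 0 < st.2.1.length then
    update_possible_gears st.1 ((PySem.Int.ofChars? st.2.1).getD 0) st.2.2
  else st.1

theorem pvOuter (input : List String) :
    (PySem.List.pyRange 0 (PySem.List.len input) 1).foldl
        (fun acc i => pvRowA input acc i (PySem.List.pyGetD input i "")) PySem.Dict.empty =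
      input.zipIdx.foldl (fun acc p =>
        (pvScanRow p.1.toList 0).foldl (pvBodyB input (p.2 : Int)) acc) PySem.Dict.empty := by
  refine Eq.trans (pvBridge input (fun pg i row => pvRowA input pg i row) PySem.Dict.empty) ?_
  apply PySem.List.foldl_congr_mem
  intro acc p hp
  have hk : input[p.2]? = some p.1 := by
    rw [← List.mk_mem_zipIdx_iff_getElem?]
    exact hp
  exact pvRow input p.2 p.1 hk p.1.toList.length 0 acc (by omega)

-- ===== VERDICT (by name: the statement is the Claim_ definition above) =====
theorem find_possible_gears_spec : Claim_equal_find_possible_gears := by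
  unfold Claim_equal_find_possible_gears
  intro input _
  unfold Spec_find_possible_gears
  show (find_possible_gears input) = find_possible_gears_alt input
  have h := pvOuter input
  exact congrArg (fun d => PySem.Dict.items d |>.map (fun kv => (kv.1.1, kv.1.2, kv.2))) h
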